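-- pv_equiv track=rewrite | github.com/thiagosantosifpb/batalha---finalizada | batalha - quase finalizada2/modulos/matriz.py | verificar_destruicao
-- ===== SOURCE A (Python) =====
-- def verificar_destruicao(matriz, linha, coluna):
--     tamanho_barco = 0
--
--     i = coluna + 1
--     while i < 8 and matriz[linha][i] == 'F':
--         tamanho_barco += 1
--         i += 1
--
--     i = coluna - 1
--     while i >= 0 and matriz[linha][i] == 'F':
--         tamanho_barco += 1
--         i -= 1
--
--     i = linha + 1
--     while i < 8 and matriz[i][coluna] == 'F':
--         tamanho_barco += 1
--         i += 1
--
--     i = linha - 1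
--     while i >= 0 and matriz[i][coluna] == 'F':
--         tamanho_barco += 1
--         i -= 1
--
--     return tamanho_barco == 0
-- ===== SOURCE B (Python) =====
-- def verificar_destruicao(matriz, linha, coluna):
--     # loop-free: the scan total is zero iff no direction's first step fires
--     return not ((coluna + 1 < 8 and matriz[linha][coluna + 1] == 'F') or
--                 (coluna - 1 >= 0 and matriz[linha][coluna - 1] == 'F') or
--                 (linha + 1 < 8 and matriz[linha + 1][coluna] == 'F') or
--                 (linha - 1 >= 0 and matriz[linha - 1][coluna] == 'F'))
-- ===== Notes on version B (the rewrite author's own statement) =====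
-- stated objective: simpler
-- what changed: A scans each of the four directions with while-loops accumulating a run-length counter and tests the total for zero; B drops the loops entirely and returns True iff each of the four immediate neighbours (under A's same range guards) is not 'F'.
import Mathlib
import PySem

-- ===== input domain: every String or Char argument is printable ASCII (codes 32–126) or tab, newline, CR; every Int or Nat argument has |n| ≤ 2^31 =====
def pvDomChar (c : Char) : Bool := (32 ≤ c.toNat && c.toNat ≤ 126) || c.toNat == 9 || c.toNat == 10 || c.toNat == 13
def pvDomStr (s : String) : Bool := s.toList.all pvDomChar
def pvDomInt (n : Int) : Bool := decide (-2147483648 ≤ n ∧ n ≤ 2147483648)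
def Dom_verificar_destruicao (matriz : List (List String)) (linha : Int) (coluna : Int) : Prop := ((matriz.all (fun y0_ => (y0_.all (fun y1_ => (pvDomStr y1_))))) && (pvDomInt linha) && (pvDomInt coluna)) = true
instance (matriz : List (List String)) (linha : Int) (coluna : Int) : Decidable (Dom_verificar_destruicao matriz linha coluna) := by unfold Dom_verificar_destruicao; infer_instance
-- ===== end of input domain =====

-- B replaces A's four counting while-loops by a single loop-free test of the four immediate neighbours (simpler, same result).


-- ===== PORT A =====
-- Python cell access matriz[r][c] (negative-index wraparound); none = IndexError
def pvCell (matriz : List (List String)) (r c : Int) : Option String :=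
  (PySem.List.pyGet? matriz r).bind (fun row => PySem.List.pyGet? row c)

-- 'i = start; while i < 8 and f i == "F": count += 1; i += 1' — returns the count
def pvScanUp (f : Int → Option String) (i : Int) : Int :=
  if h : i < 8 ∧ f i = some "F" then 1 + pvScanUp f (i + 1) else 0
termination_by (8 - i).toNat
decreasing_by omega

-- 'i = start; while i >= 0 and f i == "F": count += 1; i -= 1' — returns the count
def pvScanDown (f : Int → Option String) (i : Int) : Int :=
  if h : 0 ≤ i ∧ f i = some "F" then 1 + pvScanDown f (i - 1) else 0
termination_by (i + 1).toNat
decreasing_by omega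

def verificar_destruicao (matriz : List (List String)) (linha : Int) (coluna : Int) : Bool :=
  let tamanho_barco : Int :=
    pvScanUp (fun i => pvCell matriz linha i) (coluna + 1)
    + pvScanDown (fun i => pvCell matriz linha i) (coluna - 1)
    + pvScanUp (fun i => pvCell matriz i coluna) (linha + 1)
    + pvScanDown (fun i => pvCell matriz i coluna) (linha - 1)
  tamanho_barco == 0

-- ===== PORT B =====
def verificar_destruicao_alt (matriz : List (List String)) (linha : Int) (coluna : Int) : Bool :=
  !((decide (coluna + 1 < 8) && (pvCell matriz linha (coluna + 1) == some "F")) ||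
    (decide (0 ≤ coluna - 1) && (pvCell matriz linha (coluna - 1) == some "F")) ||
    (decide (linha + 1 < 8) && (pvCell matriz (linha + 1) coluna == some "F")) ||
    (decide (0 ≤ linha - 1) && (pvCell matriz (linha - 1) coluna == some "F")))

-- ===== PRECONDITION & SPEC =====
-- 'no IndexError along the scan': every index a directional scan can reach (start, then onward while
-- the cells before it are all 'F') is a valid Python index; with the necessary range guards on
-- linha/coluna that A's unconditional first accesses impose. This is exactly the set of inputs on
-- which the Python A returns normally.
def pvOkUp (g : Int → Option String) (s : Int) : Prop :=
  ∀ d : Nat, d < (8 - s).toNat → (∀ e : Nat, e < d → g (s + e) = some "F") → g (s + d) ≠ none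

def pvOkDown (g : Int → Option String) (s : Int) : Prop :=
  ∀ d : Nat, d < (s + 1).toNat → (∀ e : Nat, e < d → g (s - e) = some "F") → g (s - d) ≠ none

def Pre_verificar_destruicao (matriz : List (List String)) (linha : Int) (coluna : Int) : Prop :=
  match PySem.List.pyGet? matriz linha with
  | none => False
  | some row =>
      -(row.length : Int) - 1 ≤ coluna ∧ coluna ≤ (row.length : Int) ∧
      pvOkUp (fun i => (PySem.List.pyGet? matriz linha).bind (fun r => PySem.List.pyGet? r i)) (coluna + 1) ∧
      pvOkDown (fun i => (PySem.List.pyGet? matriz linha).bind (fun r => PySem.List.pyGet? r i)) (coluna - 1) ∧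
      pvOkUp (fun i => (PySem.List.pyGet? matriz i).bind (fun r => PySem.List.pyGet? r coluna)) (linha + 1) ∧
      pvOkDown (fun i => (PySem.List.pyGet? matriz i).bind (fun r => PySem.List.pyGet? r coluna)) (linha - 1)
instance (matriz : List (List String)) (linha : Int) (coluna : Int) : Decidable (Pre_verificar_destruicao matriz linha coluna) := by
  unfold Pre_verificar_destruicao pvOkUp pvOkDown
  exact match PySem.List.pyGet? matriz linha with
  | none => isFalse (fun h => h)
  | some row => inferInstance

def pvWitness_verificar_destruicao : List (List String) × Int × Int :=
  ([["~","~","~","~","~","~","~","~"], ["~","F","~","~","~","~","~","~"],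
    ["~","~","~","~","~","~","~","~"], ["~","~","~","~","~","~","~","~"],
    ["~","~","~","~","~","~","~","~"], ["~","~","~","~","~","~","~","~"],
    ["~","~","~","~","~","~","~","~"], ["~","~","~","~","~","~","~","~"]], 4, 3)

def Spec_verificar_destruicao (matriz : List (List String)) (linha : Int) (coluna : Int) (out : Bool) : Prop := out = verificar_destruicao_alt matriz linha coluna
instance (matriz : List (List String)) (linha : Int) (coluna : Int) (out : Bool) : Decidable (Spec_verificar_destruicao matriz linha coluna out) := by unfold Spec_verificar_destruicao; infer_instance

-- ===== CLAIM (what is proved, stated in full; the proofs are below) =====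
def Claim_equal_verificar_destruicao : Prop := ∀ (matriz : List (List String)) (linha : Int) (coluna : Int), Dom_verificar_destruicao matriz linha coluna → Pre_verificar_destruicao matriz linha coluna → Spec_verificar_destruicao matriz linha coluna (verificar_destruicao matriz linha coluna)

-- ===== LEMMAS AND PROOFS =====
lemma pvScanUp_nonneg (f : Int → Option String) (i : Int) : 0 ≤ pvScanUp f i := by
  fun_induction pvScanUp with
  | case1 i h ih => omega
  | case2 i h => simp

lemma pvScanDown_nonneg (f : Int → Option String) (i : Int) : 0 ≤ pvScanDown f i := by
  fun_induction pvScanDown with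
  | case1 i h ih => omega
  | case2 i h => simp

lemma pvScanUp_eq_zero (f : Int → Option String) (i : Int) :
    (pvScanUp f i = 0) ↔ ¬ (i < 8 ∧ f i = some "F") := by
  rw [pvScanUp]
  split
  · have := pvScanUp_nonneg f (i + 1)
    constructor <;> intro h' <;> first | omega | simp_all
  · simp_all

lemma pvScanDown_eq_zero (f : Int → Option String) (i : Int) :
    (pvScanDown f i = 0) ↔ ¬ (0 ≤ i ∧ f i = some "F") := by
  rw [pvScanDown]
  split
  · have := pvScanDown_nonneg f (i - 1)
    constructor <;> intro h' <;> first | omega | simp_all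
  · simp_all

-- ===== VERDICT (by name: the statement is the Claim_ definition above) =====
set_option maxHeartbeats 1000000 in
theorem verificar_destruicao_spec : Claim_equal_verificar_destruicao := by
  intro matriz linha coluna _ _
  unfold Spec_verificar_destruicao
  have h1 := pvScanUp_nonneg (fun i => pvCell matriz linha i) (coluna + 1)
  have h2 := pvScanDown_nonneg (fun i => pvCell matriz linha i) (coluna - 1)
  have h3 := pvScanUp_nonneg (fun i => pvCell matriz i coluna) (linha + 1)
  have h4 := pvScanDown_nonneg (fun i => pvCell matriz i coluna) (linha - 1)
  have e1 := pvScanUp_eq_zero (fun i => pvCell matriz linha i) (coluna + 1)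
  have e2 := pvScanDown_eq_zero (fun i => pvCell matriz linha i) (coluna - 1)
  have e3 := pvScanUp_eq_zero (fun i => pvCell matriz i coluna) (linha + 1)
  have e4 := pvScanDown_eq_zero (fun i => pvCell matriz i coluna) (linha - 1)
  simp only [verificar_destruicao, verificar_destruicao_alt]
  rw [Bool.eq_iff_iff]
  simp only [beq_iff_eq, Bool.not_eq_true', Bool.or_eq_false_iff, Bool.and_eq_false_iff,
    decide_eq_false_iff_not, beq_eq_false_iff_ne, ne_eq]
  constructor
  · intro h
    have z1 : pvScanUp (fun i => pvCell matriz linha i) (coluna + 1) = 0 := by omega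
    have z2 : pvScanDown (fun i => pvCell matriz linha i) (coluna - 1) = 0 := by omega
    have z3 : pvScanUp (fun i => pvCell matriz i coluna) (linha + 1) = 0 := by omega
    have z4 : pvScanDown (fun i => pvCell matriz i coluna) (linha - 1) = 0 := by omega
    rw [e1] at z1; rw [e2] at z2; rw [e3] at z3; rw [e4] at z4
    exact ⟨⟨⟨not_and_or.mp z1, not_and_or.mp z2⟩, not_and_or.mp z3⟩, not_and_or.mp z4⟩
  · intro h
    obtain ⟨⟨⟨d1, d2⟩, d3⟩, d4⟩ := h
    have z1 := e1.mpr (not_and_or.mpr d1)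
    have z2 := e2.mpr (not_and_or.mpr d2)
    have z3 := e3.mpr (not_and_or.mpr d3)
    have z4 := e4.mpr (not_and_or.mpr d4)
    omega
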